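-- pv_equiv track=rewrite | github.com/pokedart9001/Projects-and-Snippets | Coding Projects/Python/School Projects/CS 383/hw2/agents.py | streaks_with_blanks
-- ===== SOURCE A (Python) =====
-- def streaks_with_blanks(lst):
-- 	"""
-- 	Return the lengths of all the streaks of the same element in a sequence.
-- 	Modified version of streaks(lst) such that blank spaces are counted as part of a streak.
-- 	"""
-- 	rets = []  # list of (element, length) tuples
-- 	curr_len_p1 = 1 if lst[0] == 1 or lst[0] == 0 else 0
-- 	curr_len_p2 = 1 if lst[0] == -1 or lst[0] == 0 else 0
--
-- 	for curr in lst[1:]: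
-- 		if curr == 1:
-- 			if curr_len_p2 > 0:
-- 				rets.append((-1, curr_len_p2))
-- 			curr_len_p2 = 0
-- 			curr_len_p1 += 1
-- 		elif curr == -1:
-- 			if curr_len_p1 > 0:
-- 				rets.append((1, curr_len_p1))
-- 			curr_len_p1 = 0
-- 			curr_len_p2 += 1
-- 		else:
-- 			curr_len_p1 += 1
-- 			curr_len_p2 += 1
--
-- 	if curr_len_p1 > 0:
-- 		rets.append((1, curr_len_p1))
-- 	if curr_len_p2 > 0:
-- 		rets.append((-1, curr_len_p2))
-- 	return rets
-- ===== SOURCE B (Python) =====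
-- def streaks_with_blanks(lst):
-- 	"""Two independent per-player run-scans merged by run end index.
--
-- 	A player's streak is opened by the first cell iff it is his mark or a blank,
-- 	is broken only by the opponent's mark, and any other cell extends it.
-- 	"""
-- 	def runs(mark):
-- 		out = []
-- 		length = 1 if lst[0] == mark or lst[0] == 0 else 0
-- 		for i, x in enumerate(lst[1:], start=1):
-- 			if x == -mark:
-- 				if length:
-- 					out.append((i, length))
-- 				length = 0
-- 			else:
-- 				length += 1
-- 		if length:
-- 			out.append((len(lst), length))
-- 		return out
-- 	p1, p2 = runs(1), runs(-1)
-- 	rets = []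
-- 	a = b = 0
-- 	while a < len(p1) and b < len(p2):
-- 		if p1[a][0] <= p2[b][0]:
-- 			rets.append((1, p1[a][1])); a += 1
-- 		else:
-- 			rets.append((-1, p2[b][1])); b += 1
-- 	rets.extend((1, l) for _, l in p1[a:])
-- 	rets.extend((-1, l) for _, l in p2[b:])
-- 	return rets
-- ===== Notes on version B (the rewrite author's own statement) =====
-- stated objective: alternative
-- what changed: A's single loop carrying two interleaved counters and emitting into one list is replaced by two independent per-player run-scans (streak opened by the first cell iff own mark or blank, broken only by the opponent's mark, tagged with its end index) merged afterwards in end-index order; Pre_ excludes only the empty list, on which both programs read the first element and raise IndexError.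
import Mathlib
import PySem

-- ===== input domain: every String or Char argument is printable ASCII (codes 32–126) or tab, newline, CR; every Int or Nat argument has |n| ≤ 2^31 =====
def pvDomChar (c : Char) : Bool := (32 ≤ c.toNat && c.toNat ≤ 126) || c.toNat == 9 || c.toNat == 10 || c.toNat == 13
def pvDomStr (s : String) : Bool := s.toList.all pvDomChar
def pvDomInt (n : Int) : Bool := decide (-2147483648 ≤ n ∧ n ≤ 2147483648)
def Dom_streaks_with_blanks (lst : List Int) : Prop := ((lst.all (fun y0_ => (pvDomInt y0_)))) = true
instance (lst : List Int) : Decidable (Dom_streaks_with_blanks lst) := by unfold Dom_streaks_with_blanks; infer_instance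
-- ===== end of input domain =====

-- B replaces A's single stateful two-counter loop by two independent per-player
-- run-scans merged by run end index (objective: alternative decomposition).

-- ===== PORT A =====
-- loop body of A's 'for curr in lst[1:]' over state (rets, curr_len_p1, curr_len_p2)
def pvStepA (acc : List (Int × Int) × Int × Int) (curr : Int) : List (Int × Int) × Int × Int :=
  let rets := acc.1
  let c1 := acc.2.1
  let c2 := acc.2.2
  if curr = 1 then
    ((if 0 < c2 then rets ++ [(-1, c2)] else rets), c1 + 1, 0)
  else if curr = -1 then
    ((if 0 < c1 then rets ++ [(1, c1)] else rets), 0, c2 + 1)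
  else
    (rets, c1 + 1, c2 + 1)

-- A's trailing 'if curr_len_p1 > 0 … ; if curr_len_p2 > 0 …'
def pvFinishA (s : List (Int × Int) × Int × Int) : List (Int × Int) :=
  let r1 := if 0 < s.2.1 then s.1 ++ [(1, s.2.1)] else s.1
  if 0 < s.2.2 then r1 ++ [(-1, s.2.2)] else r1

def streaks_with_blanks (lst : List Int) : List (Int × Int) :=
  match PySem.List.pyGet? lst 0 with
  | none => []  -- reading the first element raises IndexError here: excluded by Pre_
  | some x0 =>
    let c1 : Int := if x0 = 1 ∨ x0 = 0 then 1 else 0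
    let c2 : Int := if x0 = -1 ∨ x0 = 0 then 1 else 0
    pvFinishA ((PySem.List.slice lst (some 1) none).foldl pvStepA ([], c1, c2))

-- ===== PORT B =====
-- Source B's 'for i, x in enumerate(lst[1:], start=1)' loop of runs(mark): a run is
-- broken by the opponent's mark -mark, any other cell extends it
def pvRunsGo (mark : Int) : Nat → Int → List Int → List (Int × Int)
  | i, len, [] => if 0 < len then [((i : Int), len)] else []
  | i, len, x :: xs =>
    if x = -mark then
      (if 0 < len then ((i : Int), len) :: pvRunsGo mark (i + 1) 0 xs
       else pvRunsGo mark (i + 1) 0 xs)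
    else
      pvRunsGo mark (i + 1) (len + 1) xs

-- Source B's runs(mark): the first cell opens the streak iff it is the mark or blank
def pvRunsB (mark : Int) (lst : List Int) : List (Int × Int) :=
  match PySem.List.pyGet? lst 0 with
  | none => []  -- reading the first element raises IndexError here: excluded by Pre_
  | some x0 =>
    pvRunsGo mark 1 (if x0 = mark ∨ x0 = 0 then 1 else 0) (PySem.List.slice lst (some 1) none)

-- Source B's merge loop with its two trailing extends; the Nat fuel (total remaining
-- length, never exhausted) only makes the same recursion structurally total
def pvMergeF : Nat → List (Int × Int) → List (Int × Int) → List (Int × Int)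
  | _, [], q => q.map (fun r => (-1, r.2))
  | _, p :: ps, [] => (p :: ps).map (fun r => (1, r.2))
  | Nat.succ n, p :: ps, q :: qs =>
    if p.1 ≤ q.1 then (1, p.2) :: pvMergeF n ps (q :: qs)
    else (-1, q.2) :: pvMergeF n (p :: ps) qs
  | 0, _ :: _, _ :: _ => []

def pvMerge (p q : List (Int × Int)) : List (Int × Int) := pvMergeF (p.length + q.length) p q

def streaks_with_blanks_alt (lst : List Int) : List (Int × Int) :=
  pvMerge (pvRunsB 1 lst) (pvRunsB (-1) lst)

-- ===== PRECONDITION & SPEC =====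
-- A reads the first element and raises IndexError on the empty list; nothing else is excluded.
def Pre_streaks_with_blanks (lst : List Int) : Prop := lst ≠ []
instance (lst : List Int) : Decidable (Pre_streaks_with_blanks lst) := by unfold Pre_streaks_with_blanks; infer_instance
def pvWitness_streaks_with_blanks : List Int := [0, 1, -1]

def Spec_streaks_with_blanks (lst : List Int) (out : List (Int × Int)) : Prop := out = streaks_with_blanks_alt lst
instance (lst : List Int) (out : List (Int × Int)) : Decidable (Spec_streaks_with_blanks lst out) := by unfold Spec_streaks_with_blanks; infer_instance

-- ===== CLAIM (what is proved, stated in full; the proofs are below) =====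
def Claim_equal_streaks_with_blanks : Prop := ∀ (lst : List Int), Dom_streaks_with_blanks lst → Pre_streaks_with_blanks lst → Spec_streaks_with_blanks lst (streaks_with_blanks lst)

-- ===== LEMMAS AND PROOFS =====

theorem pvMerge_nil_left (Q : List (Int × Int)) :
    pvMerge [] Q = Q.map (fun r => (-1, r.2)) := by
  cases Q <;> rfl

theorem pvMerge_nil_right (P : List (Int × Int)) :
    pvMerge P [] = P.map (fun r => (1, r.2)) := by
  cases P <;> rfl

theorem pvMerge_cons_cons (p q : Int × Int) (ps qs : List (Int × Int)) :
    pvMerge (p :: ps) (q :: qs)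
      = if p.1 ≤ q.1 then (1, p.2) :: pvMerge ps (q :: qs)
        else (-1, q.2) :: pvMerge (p :: ps) qs := by
  by_cases h : p.1 ≤ q.1
  · rw [if_pos h]
    show pvMergeF ((p :: ps).length + (q :: qs).length) _ _ = _
    rw [show (p :: ps).length + (q :: qs).length = (ps.length + (q :: qs).length) + 1 by
      simp [List.length_cons]; omega]
    simp only [pvMergeF, if_pos h]
    rfl
  · rw [if_neg h]
    show pvMergeF ((p :: ps).length + (q :: qs).length) _ _ = _
    rw [show (p :: ps).length + (q :: qs).length = ((p :: ps).length + qs.length) + 1 by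
      simp only [List.length_cons]; omega]
    simp only [pvMergeF, if_neg h]
    rfl

-- every run emitted while scanning from index i ends at index ≥ i
theorem pvRunsGo_lb (m : Int) : ∀ (xs : List Int) (i : Nat) (len : Int) (p : Int × Int),
    p ∈ pvRunsGo m i len xs → (i : Int) ≤ p.1 := by
  intro xs
  induction xs with
  | nil =>
    intro i len p hp
    simp only [pvRunsGo] at hp
    split at hp
    · rcases List.mem_singleton.mp hp with h; simp [h]
    · simp at hp
  | cons x xs ih =>
    intro i len p hp
    simp only [pvRunsGo] at hp
    split at hp
    · split at hp
      · rcases List.mem_cons.mp hp with h | h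
        · simp [h]
        · have := ih (i + 1) 0 p h; push_cast at this ⊢; omega
      · have := ih (i + 1) 0 p hp; push_cast at this ⊢; omega
    · have := ih (i + 1) _ p hp; push_cast at this ⊢; omega

theorem pvMerge_cons_right (P Q : List (Int × Int)) (i l : Int)
    (h : ∀ p ∈ P, i < p.1) :
    pvMerge P ((i, l) :: Q) = (-1, l) :: pvMerge P Q := by
  cases P with
  | nil => rw [pvMerge_nil_left, pvMerge_nil_left]; rfl
  | cons p ps =>
    have hp := h p (by simp)
    rw [pvMerge_cons_cons, if_neg (by simp; omega)]

theorem pvMerge_cons_left (P Q : List (Int × Int)) (i l : Int)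
    (h : ∀ q ∈ Q, i ≤ q.1) :
    pvMerge ((i, l) :: P) Q = (1, l) :: pvMerge P Q := by
  cases Q with
  | nil => rw [pvMerge_nil_right, pvMerge_nil_right]; rfl
  | cons q qs =>
    have hq := h q (by simp)
    rw [pvMerge_cons_cons, if_pos (by simpa using hq)]

-- main invariant: A's loop from state (rets, c1, c2) over the suffix xs (positions ≥ i)
-- produces rets followed by the merge of the two run-scans carried from (c1, c2)
theorem pvMainA : ∀ (xs : List Int) (i : Nat) (rets : List (Int × Int)) (c1 c2 : Int),
    pvFinishA (xs.foldl pvStepA (rets, c1, c2))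
      = rets ++ pvMerge (pvRunsGo 1 i c1 xs) (pvRunsGo (-1) i c2 xs) := by
  intro xs
  induction xs with
  | nil =>
    intro i rets c1 c2
    simp only [List.foldl_nil, pvFinishA, pvRunsGo]
    by_cases h1 : 0 < c1 <;> by_cases h2 : 0 < c2 <;>
      simp [h1, h2, pvMerge_nil_left, pvMerge_nil_right, pvMerge_cons_cons]
  | cons x xs ih =>
    intro i rets c1 c2
    rw [List.foldl_cons]
    by_cases hx1 : x = 1
    · subst hx1
      have hstep : pvStepA (rets, c1, c2) 1
          = ((if 0 < c2 then rets ++ [(-1, c2)] else rets), c1 + 1, 0) := by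
        norm_num [pvStepA]
      rw [hstep, ih (i + 1) _ (c1 + 1) 0]
      have hruns1 : pvRunsGo 1 i c1 ((1 : Int) :: xs) = pvRunsGo 1 (i + 1) (c1 + 1) xs := by
        rw [pvRunsGo, if_neg (by norm_num)]
      have hruns2 : pvRunsGo (-1) i c2 ((1 : Int) :: xs)
          = if 0 < c2 then ((i : Int), c2) :: pvRunsGo (-1) (i + 1) 0 xs
            else pvRunsGo (-1) (i + 1) 0 xs := by
        rw [pvRunsGo, if_pos (by norm_num)]
      rw [hruns1, hruns2]
      by_cases h2 : 0 < c2
      · rw [if_pos h2, if_pos h2, pvMerge_cons_right _ _ _ _ (by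
          intro p hp
          have := pvRunsGo_lb 1 xs (i + 1) (c1 + 1) p hp
          push_cast at this; omega)]
        simp
      · rw [if_neg h2]; simp [h2]
    · by_cases hxm1 : x = -1
      · subst hxm1
        have hstep : pvStepA (rets, c1, c2) (-1)
            = ((if 0 < c1 then rets ++ [(1, c1)] else rets), 0, c2 + 1) := by
          norm_num [pvStepA]
        rw [hstep, ih (i + 1) _ 0 (c2 + 1)]
        have hruns2 : pvRunsGo (-1) i c2 ((-1 : Int) :: xs) = pvRunsGo (-1) (i + 1) (c2 + 1) xs := by
          rw [pvRunsGo, if_neg (by norm_num)]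
        have hruns1 : pvRunsGo 1 i c1 ((-1 : Int) :: xs)
            = if 0 < c1 then ((i : Int), c1) :: pvRunsGo 1 (i + 1) 0 xs
              else pvRunsGo 1 (i + 1) 0 xs := by
          rw [pvRunsGo, if_pos (by norm_num)]
        rw [hruns1, hruns2]
        by_cases h1 : 0 < c1
        · rw [if_pos h1, if_pos h1, pvMerge_cons_left _ _ _ _ (by
            intro q hq
            have := pvRunsGo_lb (-1) xs (i + 1) (c2 + 1) q hq
            push_cast at this; omega)]
          simp [h1]
        · rw [if_neg h1]; rw [if_neg h1]
      · simp only [pvStepA]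
        rw [if_neg hx1, if_neg hxm1]
        rw [ih (i + 1) _ (c1 + 1) (c2 + 1)]
        have hruns1 : pvRunsGo 1 i c1 (x :: xs) = pvRunsGo 1 (i + 1) (c1 + 1) xs := by
          rw [pvRunsGo, if_neg (by omega)]
        have hruns2 : pvRunsGo (-1) i c2 (x :: xs) = pvRunsGo (-1) (i + 1) (c2 + 1) xs := by
          rw [pvRunsGo, if_neg (by omega)]
        rw [hruns1, hruns2]

-- ===== VERDICT (by name: the statement is the Claim_ definition above) =====
theorem streaks_with_blanks_spec : Claim_equal_streaks_with_blanks := by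
  intro lst _ hpre
  unfold Spec_streaks_with_blanks
  cases lst with
  | nil => exact absurd rfl hpre
  | cons x0 rest =>
    unfold streaks_with_blanks streaks_with_blanks_alt pvRunsB
    rw [PySem.List.pyGet?_zero_cons]
    simp only [PySem.List.slice_from_one, List.tail_cons]
    rw [pvMainA rest 1 [] _ _]
    simp
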